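-- pv_equiv track=rewrite | github.com/anroMK/codewars-python | 6kyu/enough_is_enough.py | delete_nth_v2
-- ===== SOURCE A (Python) =====
-- def delete_nth_v2(order,max_e):
--     dict = {}
--     lst = []
--     for i in order:
--         n = dict.get(i, 0)
--         if n < max_e:
--             lst.append(i)
--             dict[i] = n +1
--     return lst
-- ===== SOURCE B (Python) =====
-- def delete_nth_v2(order, max_e):
--     return [x for i, x in enumerate(order) if order[:i].count(x) < max_e]
-- ===== Notes on version B (the rewrite author's own statement) =====
-- stated objective: simpler
-- what changed: Replaced the running dict-counter loop with a one-line comprehension that keeps an element iff its count in the preceding prefix is below max_e (quadratic prefix counting instead of a maintained counter-dict).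
import Mathlib
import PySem

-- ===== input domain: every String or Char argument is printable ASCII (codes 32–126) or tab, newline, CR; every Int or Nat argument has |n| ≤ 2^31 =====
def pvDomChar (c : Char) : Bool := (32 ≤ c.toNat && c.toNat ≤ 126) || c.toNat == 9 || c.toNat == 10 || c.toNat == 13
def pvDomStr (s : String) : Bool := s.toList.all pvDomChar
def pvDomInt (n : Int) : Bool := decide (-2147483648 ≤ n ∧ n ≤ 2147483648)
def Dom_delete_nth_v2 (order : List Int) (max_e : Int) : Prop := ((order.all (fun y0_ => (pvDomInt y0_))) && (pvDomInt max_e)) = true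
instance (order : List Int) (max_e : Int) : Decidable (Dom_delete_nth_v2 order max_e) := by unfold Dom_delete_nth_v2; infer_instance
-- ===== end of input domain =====

-- B replaces A's running counter-dict loop with a comprehension keeping an element iff its
-- count in the preceding prefix is below max_e (simpler decomposition, not faster).

-- ===== PORT A =====
def delete_nth_v2 (order : List Int) (max_e : Int) : List Int :=
  (order.foldl (fun (st : PySem.Dict Int Int × List Int) i =>
      let n := st.1.getD i 0
      if n < max_e then (st.1.insert i (n + 1), st.2 ++ [i]) else st)
    (PySem.Dict.empty, [])).2

-- ===== PORT B =====
def delete_nth_v2_alt (order : List Int) (max_e : Int) : List Int :=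
  ((PySem.List.enumerate order 0).filter
      (fun p => ((PySem.List.slice order none (some p.1)).count p.2 : Int) < max_e)).map (·.2)

-- ===== PRECONDITION & SPEC =====
def Spec_delete_nth_v2 (order : List Int) (max_e : Int) (out : List Int) : Prop := out = delete_nth_v2_alt order max_e
instance (order : List Int) (max_e : Int) (out : List Int) : Decidable (Spec_delete_nth_v2 order max_e out) := by unfold Spec_delete_nth_v2; infer_instance

-- ===== CLAIM (what is proved, stated in full; the proofs are below) =====
def Claim_equal_delete_nth_v2 : Prop := ∀ (order : List Int) (max_e : Int), Dom_delete_nth_v2 order max_e → Spec_delete_nth_v2 order max_e (delete_nth_v2 order max_e)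

-- ===== LEMMAS AND PROOFS =====

-- common recursive specification: keep x iff its count in the prefix seen so far is < m
def pvKeep (m : Int) : List Int → List Int → List Int
  | _, [] => []
  | pre, x :: rest =>
      if ((pre.count x : Int)) < m then x :: pvKeep m (pre ++ [x]) rest
      else pvKeep m (pre ++ [x]) rest

lemma pvA_loop (m : Int) (rest : List Int) :
    ∀ (pre : List Int) (d : PySem.Dict Int Int) (acc : List Int),
    (∀ x, d.getD x 0 = min ((pre.count x : Int)) (max m 0)) →
    ((rest.foldl (fun (st : PySem.Dict Int Int × List Int) i =>
        let n := st.1.getD i 0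
        if n < m then (st.1.insert i (n + 1), st.2 ++ [i]) else st)
      (d, acc)).2) = acc ++ pvKeep m pre rest := by
  induction rest with
  | nil => intro pre d acc _; simp [pvKeep]
  | cons x rest ih =>
    intro pre d acc hd
    have hc0 : (0 : Int) ≤ (pre.count x : Int) := Int.natCast_nonneg _
    have hcond : (d.getD x 0 < m) ↔ ((pre.count x : Int) < m) := by
      rw [hd x]; omega
    by_cases h : ((pre.count x : Int)) < m
    · have h' : d.getD x 0 < m := hcond.mpr h
      simp only [List.foldl_cons, pvKeep, if_pos h, if_pos h']
      rw [ih (pre ++ [x]) _ (acc ++ [x]) ?_]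
      · simp
      · intro y
        rw [PySem.Dict.getD_insert]
        by_cases hxy : y = x
        · subst hxy
          simp only [hd y, List.count_append, List.count_singleton]
          simp only [beq_self_eq_true, if_pos]
          push_cast
          omega
        · rw [if_neg hxy, hd y, List.count_append, List.count_singleton]
          have : (x == y) = false := by simp [Ne.symm hxy]
          simp [this]
    · have h' : ¬ d.getD x 0 < m := fun hh => h (hcond.mp hh)
      simp only [List.foldl_cons, pvKeep, if_neg h, if_neg h']
      refine ih (pre ++ [x]) d acc ?_
      intro y
      rw [hd y, List.count_append, List.count_singleton]
      by_cases hxy : x = y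
      · subst hxy
        have hge : m ≤ (pre.count x : Int) := le_of_not_gt h
        simp only [beq_self_eq_true, if_pos]
        push_cast
        omega
      · have : (x == y) = false := by simp [hxy]
        simp [this]

lemma pvB_loop (m : Int) (order : List Int) (rest : List Int) :
    ∀ (pre : List Int), pre ++ rest = order →
    ((PySem.List.enumerate rest (pre.length : Int)).filter
        (fun p => ((PySem.List.slice order none (some p.1)).count p.2 : Int) < m)).map (·.2)
      = pvKeep m pre rest := by
  induction rest with
  | nil => intro pre _; simp [PySem.List.enumerate_nil, pvKeep]
  | cons x rest ih =>
    intro pre hpre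
    rw [PySem.List.enumerate_cons]
    have hslice : PySem.List.slice order none (some ((pre.length : Int))) = pre := by
      rw [PySem.List.slice_to_natCast, ← hpre, List.take_left]
    have hnext : ((pre.length : Int) + 1) = (((pre ++ [x]).length : Nat) : Int) := by
      simp
    have hpre' : (pre ++ [x]) ++ rest = order := by rw [← hpre]; simp
    by_cases h : ((pre.count x : Int)) < m
    · rw [List.filter_cons_of_pos (by simpa [hslice] using h)]
      simp only [List.map_cons, pvKeep, if_pos h]
      rw [hnext, ih (pre ++ [x]) hpre']
    · rw [List.filter_cons_of_neg (by simpa [hslice] using h)]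
      simp only [pvKeep, if_neg h]
      rw [hnext, ih (pre ++ [x]) hpre']

lemma pvA_eq_keep (order : List Int) (m : Int) :
    delete_nth_v2 order m = pvKeep m [] order := by
  unfold delete_nth_v2
  rw [pvA_loop m order [] PySem.Dict.empty []]
  · simp
  · intro x
    rw [PySem.Dict.getD_empty]
    simp

lemma pvB_eq_keep (order : List Int) (m : Int) :
    delete_nth_v2_alt order m = pvKeep m [] order := by
  unfold delete_nth_v2_alt
  have := pvB_loop m order order [] (by simp)
  simpa using this

-- ===== VERDICT (by name: the statement is the Claim_ definition above) =====
theorem delete_nth_v2_spec : Claim_equal_delete_nth_v2 := by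
  intro order max_e _
  unfold Spec_delete_nth_v2
  rw [pvA_eq_keep, pvB_eq_keep]
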